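-- pv_equiv track=rewrite | github.com/parkchanghyup/algorithm | python/백준/[python]백준-상어 초등학교.py | check_friend
-- ===== SOURCE A (Python) =====
-- dx = [1, -1, 0, 0]
--
-- dy = [0, 0, 1, -1]
--
-- def check_friend(graph, number):
--     me = number[0]
--     friend = number[1:]
--     max_friend = []
--     max_cnt = 0
--     check_graph = [[0] * len(graph) for _ in range(len(graph))]
--
--     for i in range(len(graph)):
--         for j in range(len(graph)):
--             cnt = 0
--             if graph[i][j] == 0:
--                 for d in range(4):
--                     nx = j + dx[d]
--                     ny = i + dy[d]
--                     if nx >= 0 and nx < len(graph) and ny >= 0 and ny < len(graph):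
--                         if graph[ny][nx] in friend:
--                             cnt += 1
--                 if max_cnt == cnt:
--                     max_friend.append((i, j))
--                 elif max_cnt < cnt:
--                     max_cnt = cnt
--                     max_friend = [(i, j)]
--
--     return max_friend
-- ===== SOURCE B (Python) =====
-- def check_friend(graph, number):
--     me = number[0]
--     friends = set(number[1:])
--     n = len(graph)
--     # scatter: each friendly cell contributes +1 to each adjacent empty cell
--     cnt = [[0] * n for _ in range(n)]
--     for i in range(n):
--         for j in range(n):
--             if graph[i][j] in friends:
--                 for ni, nj in ((i - 1, j), (i + 1, j), (i, j - 1), (i, j + 1)):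
--                     if 0 <= ni < n and 0 <= nj < n and graph[ni][nj] == 0:
--                         cnt[ni][nj] += 1
--     m = 0
--     for i in range(n):
--         for j in range(n):
--             if graph[i][j] == 0 and cnt[i][j] > m:
--                 m = cnt[i][j]
--     return [(i, j) for i in range(n) for j in range(n)
--             if graph[i][j] == 0 and cnt[i][j] == m]
-- ===== Notes on version B (the rewrite author's own statement) =====
-- stated objective: alternative
-- what changed: A gathers: for each empty cell it scans its 4 neighbors against the friend list while keeping a running maximum with conditional list reset; B scatters: it builds a count grid by letting every friendly cell add 1 to each adjacent empty cell, then takes the maximum over empty cells in a second pass and emits the empty cells at that maximum in a third.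
import Mathlib
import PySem

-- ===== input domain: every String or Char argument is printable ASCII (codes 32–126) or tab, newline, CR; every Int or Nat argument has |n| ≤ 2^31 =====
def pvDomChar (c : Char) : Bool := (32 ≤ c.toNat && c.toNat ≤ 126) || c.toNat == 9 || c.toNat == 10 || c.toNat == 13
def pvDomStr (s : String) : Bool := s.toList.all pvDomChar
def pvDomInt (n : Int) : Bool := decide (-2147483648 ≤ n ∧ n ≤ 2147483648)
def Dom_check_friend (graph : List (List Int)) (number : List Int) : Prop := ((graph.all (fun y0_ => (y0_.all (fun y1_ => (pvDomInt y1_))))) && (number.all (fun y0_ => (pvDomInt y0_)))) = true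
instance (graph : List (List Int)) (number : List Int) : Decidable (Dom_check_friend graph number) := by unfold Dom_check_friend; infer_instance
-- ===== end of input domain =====

-- B replaces A's gather pass (each empty cell scans its 4 neighbors, running max with
-- conditional list reset) by a scatter algorithm: every friendly cell adds 1 to each
-- adjacent empty cell of a count grid, then the maximum over empty cells is taken in a
-- second pass and the empty cells at that maximum are emitted in a third (objective: alternative).

-- ===== PORT A =====
-- graph[r][c]; the Python program only reads indices that are in range (guaranteed by Pre_)
def pvAt (graph : List (List Int)) (r c : Int) : Int :=
  PySem.List.pyGetD (PySem.List.pyGetD graph r []) c 0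

def pvDx : List Int := [1, -1, 0, 0]
def pvDy : List Int := [0, 0, 1, -1]

def check_friend (graph : List (List Int)) (number : List Int) : List (Int × Int) :=
  let n : Int := PySem.List.len graph
  let friend : List Int := PySem.List.slice number (some 1) none
  let st := (PySem.List.pyRange 0 n 1).foldl (fun st i =>
    (PySem.List.pyRange 0 n 1).foldl (fun st j =>
      if pvAt graph i j == 0 then
        let cnt : Int := (PySem.List.pyRange 0 4 1).foldl (fun cnt d =>
          let nx := j + PySem.List.pyGetD pvDx d 0
          let ny := i + PySem.List.pyGetD pvDy d 0
          if nx ≥ 0 ∧ nx < n ∧ ny ≥ 0 ∧ ny < n then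
            if friend.contains (pvAt graph ny nx) then cnt + 1 else cnt
          else cnt) 0
        if st.1 == cnt then (st.1, st.2 ++ [(i, j)])
        else if st.1 < cnt then (cnt, [(i, j)])
        else st
      else st) st) ((0 : Int), ([] : List (Int × Int)))
  st.2

-- ===== PORT B =====
-- cnt (the mutable n×n count matrix of Source B) is ported as a total function
-- (Int × Int) → Int with pointwise update; exact, since Source B only writes
-- in-range index pairs (guarded by 0 <= ni < n and 0 <= nj < n).
def check_friend_alt (graph : List (List Int)) (number : List Int) : List (Int × Int) :=
  let n : Int := PySem.List.len graph
  let friends : PySem.Set Int := PySem.Set.ofList (PySem.List.slice number (some 1) none)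
  let cnt : Int × Int → Int := (PySem.List.pyRange 0 n 1).foldl (fun f i =>
    (PySem.List.pyRange 0 n 1).foldl (fun f j =>
      if PySem.Set.contains friends (pvAt graph i j) then
        [(i - 1, j), (i + 1, j), (i, j - 1), (i, j + 1)].foldl (fun f p =>
          if 0 ≤ p.1 ∧ p.1 < n ∧ 0 ≤ p.2 ∧ p.2 < n ∧ pvAt graph p.1 p.2 == 0 then
            (fun q => if q = p then f q + 1 else f q)
          else f) f
      else f) f) (fun _ => (0 : Int))
  let m : Int := (PySem.List.pyRange 0 n 1).foldl (fun m i =>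
    (PySem.List.pyRange 0 n 1).foldl (fun m j =>
      if pvAt graph i j == 0 ∧ m < cnt (i, j) then cnt (i, j) else m) m) 0
  (PySem.List.pyRange 0 n 1).flatMap (fun i =>
    ((PySem.List.pyRange 0 n 1).filter
        (fun j => pvAt graph i j == 0 && cnt (i, j) == m)).map (fun j => (i, j)))

-- ===== PRECONDITION & SPEC =====
-- Pre_ excludes exactly the inputs where A raises IndexError: an empty `number`
-- (number[0]), or a row of the square-by-convention grid shorter than len(graph).
def Pre_check_friend (graph : List (List Int)) (number : List Int) : Prop :=
  number ≠ [] ∧ ∀ row ∈ graph, graph.length ≤ row.length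
instance (graph : List (List Int)) (number : List Int) : Decidable (Pre_check_friend graph number) := by unfold Pre_check_friend; infer_instance

def pvWitness_check_friend : List (List Int) × List Int :=
  ([[0, 1], [2, 0]], [3, 1, 2])

def Spec_check_friend (graph : List (List Int)) (number : List Int) (out : List (Int × Int)) : Prop := out = check_friend_alt graph number
instance (graph : List (List Int)) (number : List Int) (out : List (Int × Int)) : Decidable (Spec_check_friend graph number out) := by unfold Spec_check_friend; infer_instance

-- ===== CLAIM (what is proved, stated in full; the proofs are below) =====
def Claim_equal_check_friend : Prop := ∀ (graph : List (List Int)) (number : List Int), Dom_check_friend graph number → Pre_check_friend graph number → Spec_check_friend graph number (check_friend graph number)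

-- ===== LEMMAS AND PROOFS =====

-- the neighbor indicator: 1 iff (r,c) is inside the n×n board and holds a friend's number
def pvNb (graph : List (List Int)) (fr : List Int) (n r c : Int) : Int :=
  if 0 ≤ r ∧ r < n ∧ 0 ≤ c ∧ c < n ∧ fr.contains (pvAt graph r c) then 1 else 0

def pvCnt (graph : List (List Int)) (fr : List Int) (n i j : Int) : Int :=
  pvNb graph fr n (i - 1) j + pvNb graph fr n (i + 1) j +
  pvNb graph fr n i (j - 1) + pvNb graph fr n i (j + 1)

-- the shared row-major list of (empty cell, count) pairs
def pvCells (graph : List (List Int)) (fr : List Int) (n : Int) : List ((Int × Int) × Int) :=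
  (PySem.List.pyRange 0 n 1).flatMap (fun i =>
    ((PySem.List.pyRange 0 n 1).filter (fun j => pvAt graph i j == 0)).map
      (fun j => ((i, j), pvCnt graph fr n i j)))

-- A's per-cell update
def pvUpd (st : Int × List (Int × Int)) (x : (Int × Int) × Int) : Int × List (Int × Int) :=
  if st.1 == x.2 then (st.1, st.2 ++ [x.1])
  else if st.1 < x.2 then (x.2, [x.1])
  else st

theorem pvFoldl_flatMap {α β γ : Type} (f : β → α → β) (g : γ → List α) (l : List γ) (init : β) :
    l.foldl (fun st x => (g x).foldl f st) init = (l.flatMap g).foldl f init := by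
  induction l generalizing init with
  | nil => rfl
  | cons a t ih => simp [List.flatMap_cons, List.foldl_append, ih]

theorem pvRange4 : PySem.List.pyRange 0 4 1 = [0, 1, 2, 3] := by decide

theorem pvContains_ofList (fr : List Int) (x : Int) :
    List.contains (PySem.Set.ofList fr) x = fr.contains x := by
  rw [Bool.eq_iff_iff]
  simp [PySem.Set.mem_ofList]

theorem pvStepA (graph : List (List Int)) (fr : List Int) (n r c cnt : Int) :
    (if c ≥ 0 ∧ c < n ∧ r ≥ 0 ∧ r < n then
        if fr.contains (pvAt graph r c) then cnt + 1 else cnt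
      else cnt) = cnt + pvNb graph fr n r c := by
  have hiff : ((c ≥ 0 ∧ c < n ∧ r ≥ 0 ∧ r < n) ∧ fr.contains (pvAt graph r c) = true) ↔
      (0 ≤ r ∧ r < n ∧ 0 ≤ c ∧ c < n ∧ fr.contains (pvAt graph r c) = true) := by
    tauto
  unfold pvNb
  rw [← ite_and, if_congr hiff rfl rfl]
  split_ifs <;> omega

theorem pvCntA_eq (graph : List (List Int)) (fr : List Int) (n i j : Int) :
    (PySem.List.pyRange 0 4 1).foldl (fun cnt d =>
        let nx := j + PySem.List.pyGetD pvDx d 0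
        let ny := i + PySem.List.pyGetD pvDy d 0
        if nx ≥ 0 ∧ nx < n ∧ ny ≥ 0 ∧ ny < n then
          if fr.contains (pvAt graph ny nx) then cnt + 1 else cnt
        else cnt) 0 = pvCnt graph fr n i j := by
  rw [pvRange4]
  have g0 : PySem.List.pyGetD pvDx 0 0 = 1 := by decide
  have g1 : PySem.List.pyGetD pvDx 1 0 = -1 := by decide
  have g2 : PySem.List.pyGetD pvDx 2 0 = 0 := by decide
  have g3 : PySem.List.pyGetD pvDx 3 0 = 0 := by decide
  have h0 : PySem.List.pyGetD pvDy 0 0 = 0 := by decide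
  have h1 : PySem.List.pyGetD pvDy 1 0 = 0 := by decide
  have h2 : PySem.List.pyGetD pvDy 2 0 = 1 := by decide
  have h3 : PySem.List.pyGetD pvDy 3 0 = -1 := by decide
  simp only [List.foldl, g0, g1, g2, g3, h0, h1, h2, h3]
  rw [show j + (0:Int) = j by ring, show i + (0:Int) = i by ring,
      show j + (-1:Int) = j - 1 by ring, show i + (-1:Int) = i - 1 by ring]
  rw [pvStepA, pvStepA, pvStepA, pvStepA]
  unfold pvCnt
  ring

-- A's loop over any pair list is "final running max + the cells at that max"
theorem pvRun_eq (E : List ((Int × Int) × Int)) :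
    E.foldl pvUpd (0, []) =
      (E.foldl (fun a x => max a x.2) 0,
       (E.filter (fun x => x.2 == E.foldl (fun a x => max a x.2) 0)).map (·.1)) := by
  induction E using List.reverseRecOn with
  | nil => rfl
  | append_singleton t e ih =>
    have hle := (PySem.List.le_foldl_max_int t (fun x => x.2) 0).2
    rw [List.foldl_append, List.foldl_append, ih]
    simp only [List.foldl, List.filter_append]
    rcases lt_trichotomy (t.foldl (fun a x => max a x.2) 0) e.2 with h | h | h
    · have hmax : max (t.foldl (fun a x => max a x.2) 0) e.2 = e.2 := by omega
      rw [hmax]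
      unfold pvUpd
      rw [if_neg (by simp; omega), if_pos (by simpa using h)]
      have hft : t.filter (fun x => x.2 == e.2) = [] := by
        apply List.filter_eq_nil_iff.mpr
        intro x hx
        have := hle x hx
        simp only [beq_iff_eq]
        omega
      simp [hft, List.filter]
    · have hmax : max (t.foldl (fun a x => max a x.2) 0) e.2 = t.foldl (fun a x => max a x.2) 0 := by omega
      rw [hmax]
      unfold pvUpd
      rw [if_pos (by simpa using h)]
      have he : (e.2 == t.foldl (fun a x => max a x.2) 0) = true := by simpa using h.symm
      simp [List.filter, he]
    · have hmax : max (t.foldl (fun a x => max a x.2) 0) e.2 = t.foldl (fun a x => max a x.2) 0 := by omega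
      rw [hmax]
      unfold pvUpd
      rw [if_neg (by simp; omega), if_neg (by omega)]
      have he : (e.2 == t.foldl (fun a x => max a x.2) 0) = false := by simp; omega
      simp [List.filter, he]

-- A equals the fold of pvUpd over pvCells
theorem pvA_eq (graph : List (List Int)) (number : List Int) :
    check_friend graph number =
      ((pvCells graph number.tail (PySem.List.len graph)).foldl pvUpd (0, [])).2 := by
  simp only [check_friend, PySem.List.slice_from_one]
  congr 1
  unfold pvCells
  rw [← pvFoldl_flatMap]
  apply PySem.List.foldl_congr_mem
  intro st i _
  rw [List.foldl_map, ← PySem.List.foldl_if_eq_foldl_filter]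
  apply PySem.List.foldl_congr_mem
  intro st' j _
  by_cases h : (pvAt graph i j == 0) = true
  · simp only [h, if_true]
    rw [pvCntA_eq]
    rfl
  · simp only [h]
    rfl

-- ===== B-side: the scatter fold is pointwise addition of per-cell contributions =====

-- integer sum of a mapped list
def pvSum {α : Type} (l : List α) (g : α → Int) : Int := (l.map g).sum

theorem pvSum_cons {α : Type} (a : α) (t : List α) (g : α → Int) :
    pvSum (a :: t) g = g a + pvSum t g := by
  simp [pvSum]

theorem pvSum_add {α : Type} (l : List α) (g h : α → Int) :
    pvSum l (fun x => g x + h x) = pvSum l g + pvSum l h := by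
  induction l with
  | nil => simp [pvSum]
  | cons a t ih => simp only [pvSum_cons, ih]; ring

theorem pvSum_congr {α : Type} (l : List α) (g h : α → Int)
    (he : ∀ x ∈ l, g x = h x) : pvSum l g = pvSum l h := by
  unfold pvSum
  rw [List.map_congr_left he]

-- point mass: summing an indicator of "x = c" over a Nodup list
theorem pvSum_point {α : Type} [DecidableEq α] (l : List α) (hl : l.Nodup) (c : α)
    (P : Prop) [Decidable P] :
    pvSum l (fun x => if x = c ∧ P then (1 : Int) else 0) = if c ∈ l ∧ P then 1 else 0 := by
  induction l with
  | nil => simp [pvSum]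
  | cons a t ih =>
    rw [pvSum_cons, ih hl.of_cons]
    by_cases hac : a = c
    · subst hac
      have hnt : a ∉ t := (List.nodup_cons.mp hl).1
      by_cases hP : P <;> simp [hnt, hP]
    · by_cases hP : P <;> simp [hac, hP, Ne.symm hac]

-- any fold whose step is pointwise addition is the pointwise sum
theorem pvFold_pointwise {α β : Type} (step : (β → Int) → α → (β → Int))
    (g : α → β → Int) (hstep : ∀ f x p, step f x p = f p + g x p)
    (l : List α) (f : β → Int) (p : β) :
    (l.foldl step f) p = f p + pvSum l (fun x => g x p) := by
  induction l generalizing f with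
  | nil => simp [pvSum]
  | cons a t ih =>
    rw [List.foldl_cons, ih, hstep, pvSum_cons]
    ring

-- one conditional pointwise bump
theorem pvUpdAt {β : Type} [DecidableEq β] (c : Prop) [Decidable c]
    (f : β → Int) (p0 p : β) :
    (if c then (fun q => if q = p0 then f q + 1 else f q) else f) p
      = f p + (if c ∧ p = p0 then 1 else 0) := by
  split_ifs with h1 h2 h3 <;> simp_all

-- the per-cell contribution of cell (i, j) to the count at p
def pvG (graph : List (List Int)) (fr : List Int) (n : Int) (x : Int × Int)
    (p : Int × Int) : Int :=
  if fr.contains (pvAt graph x.1 x.2) then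
    [(x.1 - 1, x.2), (x.1 + 1, x.2), (x.1, x.2 - 1), (x.1, x.2 + 1)].foldl
      (fun s q =>
        s + (if (0 ≤ q.1 ∧ q.1 < n ∧ 0 ≤ q.2 ∧ q.2 < n ∧ pvAt graph q.1 q.2 == 0) ∧ p = q
             then 1 else 0)) 0
  else 0

-- the inner 4-neighbor scatter loop, evaluated at p
theorem pvScatterCell (graph : List (List Int)) (fr : List Int) (n : Int)
    (x : Int × Int) (f : Int × Int → Int) (p : Int × Int) :
    (if List.contains (PySem.Set.ofList fr) (pvAt graph x.1 x.2) then
        [(x.1 - 1, x.2), (x.1 + 1, x.2), (x.1, x.2 - 1), (x.1, x.2 + 1)].foldl (fun f q =>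
          if 0 ≤ q.1 ∧ q.1 < n ∧ 0 ≤ q.2 ∧ q.2 < n ∧ pvAt graph q.1 q.2 == 0 then
            (fun r => if r = q then f r + 1 else f r)
          else f) f
      else f) p = f p + pvG graph fr n x p := by
  rw [pvContains_ofList]
  unfold pvG
  by_cases hfr : fr.contains (pvAt graph x.1 x.2) = true
  · simp only [hfr, if_true]
    simp only [List.foldl]
    rw [pvUpdAt, pvUpdAt, pvUpdAt, pvUpdAt]
    ring
  · simp only [hfr]
    simp

-- the whole count grid, evaluated at p, is the double sum of pvG
theorem pvCnt_scatter (graph : List (List Int)) (fr : List Int) (n : Int) (p : Int × Int) :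
    ((PySem.List.pyRange 0 n 1).foldl (fun f i =>
      (PySem.List.pyRange 0 n 1).foldl (fun f j =>
        if List.contains (PySem.Set.ofList fr) (pvAt graph i j) then
          [(i - 1, j), (i + 1, j), (i, j - 1), (i, j + 1)].foldl (fun f q =>
            if 0 ≤ q.1 ∧ q.1 < n ∧ 0 ≤ q.2 ∧ q.2 < n ∧ pvAt graph q.1 q.2 == 0 then
              (fun r => if r = q then f r + 1 else f r)
            else f) f
        else f) f) (fun _ => (0 : Int))) p
    = pvSum (PySem.List.pyRange 0 n 1) (fun i =>
        pvSum (PySem.List.pyRange 0 n 1) (fun j => pvG graph fr n (i, j) p)) := by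
  rw [pvFold_pointwise
        (g := fun i q => pvSum (PySem.List.pyRange 0 n 1) (fun j => pvG graph fr n (i, j) q))]
  · simp
  · intro f i q
    exact pvFold_pointwise _ (fun j r => pvG graph fr n (i, j) r)
      (fun f j r => pvScatterCell graph fr n (i, j) f r) _ f q

-- the scatter total as a named double sum
def pvS (graph : List (List Int)) (fr : List Int) (n : Int) (p : Int × Int) : Int :=
  pvSum (PySem.List.pyRange 0 n 1) (fun i =>
    pvSum (PySem.List.pyRange 0 n 1) (fun j => pvG graph fr n (i, j) p))

theorem pvS_fold (graph : List (List Int)) (fr : List Int) (n : Int) (p : Int × Int) :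
    ((PySem.List.pyRange 0 n 1).foldl (fun f i =>
      (PySem.List.pyRange 0 n 1).foldl (fun f j =>
        if List.contains (PySem.Set.ofList fr) (pvAt graph i j) then
          [(i - 1, j), (i + 1, j), (i, j - 1), (i, j + 1)].foldl (fun f q =>
            if 0 ≤ q.1 ∧ q.1 < n ∧ 0 ≤ q.2 ∧ q.2 < n ∧ pvAt graph q.1 q.2 == 0 then
              (fun r => if r = q then f r + 1 else f r)
            else f) f
        else f) f) (fun _ => (0 : Int))) p
    = pvS graph fr n p := by
  unfold pvS
  rw [pvCnt_scatter]

-- distribute an if over a four-term sum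
theorem pvIfDist (c : Prop) [Decidable c] (x1 x2 x3 x4 : Int) :
    (if c then ((x1 + x2) + x3) + x4 else 0)
      = (((if c then x1 else 0) + (if c then x2 else 0)) + (if c then x3 else 0))
        + (if c then x4 else 0) := by
  split_ifs <;> ring

-- one scatter indicator, rewritten as a point mass at the mirrored neighbor
theorem pvTerm (graph : List (List Int)) (fr : List Int) (n a b i j u v r s : Int)
    (ha : 0 ≤ a) (ha' : a < n) (hb : 0 ≤ b) (hb' : b < n) (hz : pvAt graph a b = 0)
    (hiff : a = u ∧ b = v ↔ i = r ∧ j = s) (hu : i = r → j = s → u = a ∧ v = b) :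
    (if fr.contains (pvAt graph i j) = true then
        (if (0 ≤ u ∧ u < n ∧ 0 ≤ v ∧ v < n ∧ pvAt graph u v == 0) ∧ (a, b) = (u, v)
          then (1 : Int) else 0)
      else 0)
    = if (i, j) = (r, s) ∧ fr.contains (pvAt graph r s) = true then 1 else 0 := by
  by_cases hfr : fr.contains (pvAt graph i j) = true
  · rw [if_pos hfr]
    by_cases h : i = r ∧ j = s
    · obtain ⟨hi, hj⟩ := h
      obtain ⟨hua, hvb⟩ := hu hi hj
      subst hi
      subst hj
      subst hua
      subst hvb
      rw [if_pos ⟨⟨ha, ha', hb, hb', by simp [hz]⟩, rfl⟩, if_pos ⟨rfl, hfr⟩]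
    · have hne : ¬ ((a, b) = (u, v)) := by
        intro hp
        rw [Prod.mk.injEq] at hp
        exact h (hiff.mp ⟨hp.1, hp.2⟩)
      rw [if_neg (fun hx => hne hx.2)]
      have hR : ¬ ((i, j) = (r, s) ∧ fr.contains (pvAt graph r s) = true) := by
        rintro ⟨hp, -⟩
        rw [Prod.mk.injEq] at hp
        exact h hp
      rw [if_neg hR]
  · rw [if_neg hfr]
    have hR : ¬ ((i, j) = (r, s) ∧ fr.contains (pvAt graph r s) = true) := by
      rintro ⟨hp, hcc⟩
      rw [Prod.mk.injEq] at hp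
      obtain ⟨hi, hj⟩ := hp
      subst hi
      subst hj
      exact hfr hcc
    rw [if_neg hR]

-- point mass over the double range enumeration
theorem pvSum2_point (l1 l2 : List Int) (h1 : l1.Nodup) (h2 : l2.Nodup) (r c : Int)
    (P : Prop) [Decidable P] :
    pvSum l1 (fun i => pvSum l2 (fun j => if (i, j) = (r, c) ∧ P then (1 : Int) else 0))
      = if (r ∈ l1 ∧ c ∈ l2) ∧ P then 1 else 0 := by
  have hin : ∀ i : Int, pvSum l2 (fun j => if (i, j) = (r, c) ∧ P then (1 : Int) else 0)
      = if i = r ∧ (c ∈ l2 ∧ P) then 1 else 0 := by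
    intro i
    rw [pvSum_congr _ _ (fun j => if j = c ∧ (i = r ∧ P) then (1 : Int) else 0)
          (fun j _ => by
            apply if_congr _ rfl rfl
            rw [Prod.mk.injEq]
            tauto),
        pvSum_point l2 h2 c (i = r ∧ P)]
    apply if_congr _ rfl rfl
    tauto
  rw [pvSum_congr _ _ _ (fun i _ => hin i), pvSum_point l1 h1 r (c ∈ l2 ∧ P)]
  apply if_congr _ rfl rfl
  tauto

-- at an in-range empty cell the scatter total is the gather count pvCnt
theorem pvS_eq_pvCnt (graph : List (List Int)) (fr : List Int) (n a b : Int)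
    (ha : 0 ≤ a) (ha' : a < n) (hb : 0 ≤ b) (hb' : b < n)
    (hz : pvAt graph a b = 0) :
    pvS graph fr n (a, b) = pvCnt graph fr n a b := by
  have hcell : ∀ i j : Int, pvG graph fr n (i, j) (a, b) =
      (((if (i, j) = (a + 1, b) ∧ fr.contains (pvAt graph (a + 1) b) = true then (1:Int) else 0)
        + (if (i, j) = (a - 1, b) ∧ fr.contains (pvAt graph (a - 1) b) = true then (1:Int) else 0))
        + (if (i, j) = (a, b + 1) ∧ fr.contains (pvAt graph a (b + 1)) = true then (1:Int) else 0))
        + (if (i, j) = (a, b - 1) ∧ fr.contains (pvAt graph a (b - 1)) = true then (1:Int) else 0) := by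
    intro i j
    unfold pvG
    simp only [List.foldl, zero_add]
    rw [pvIfDist]
    rw [pvTerm graph fr n a b i j (i - 1) j (a + 1) b ha ha' hb hb' hz (by omega)
          (fun h1 h2 => by omega),
        pvTerm graph fr n a b i j (i + 1) j (a - 1) b ha ha' hb hb' hz (by omega)
          (fun h1 h2 => by omega),
        pvTerm graph fr n a b i j i (j - 1) a (b + 1) ha ha' hb hb' hz (by omega)
          (fun h1 h2 => by omega),
        pvTerm graph fr n a b i j i (j + 1) a (b - 1) ha ha' hb hb' hz (by omega)
          (fun h1 h2 => by omega)]
  unfold pvS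
  simp only [hcell, pvSum_add]
  have hnd := PySem.List.nodup_pyRange_one (a := 0) (b := n)
  rw [pvSum2_point _ _ hnd hnd (a + 1) b, pvSum2_point _ _ hnd hnd (a - 1) b,
      pvSum2_point _ _ hnd hnd a (b + 1), pvSum2_point _ _ hnd hnd a (b - 1)]
  have hN : ∀ r c : Int,
      (if (r ∈ PySem.List.pyRange 0 n 1 ∧ c ∈ PySem.List.pyRange 0 n 1)
          ∧ fr.contains (pvAt graph r c) = true then (1 : Int) else 0)
        = pvNb graph fr n r c := by
    intro r c
    unfold pvNb
    apply if_congr _ rfl rfl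
    rw [PySem.List.mem_pyRange_one, PySem.List.mem_pyRange_one]
    tauto
  simp only [hN]
  unfold pvCnt
  ring

-- B's second pass (running maximum over empty cells) is the running max over pvCells
theorem pvM_eq (graph : List (List Int)) (fr : List Int) (n : Int) :
    (PySem.List.pyRange 0 n 1).foldl (fun m i =>
      (PySem.List.pyRange 0 n 1).foldl (fun m j =>
        if pvAt graph i j == 0 ∧ m < pvS graph fr n (i, j) then pvS graph fr n (i, j) else m)
        m) 0
    = (pvCells graph fr n).foldl (fun a x => max a x.2) 0 := by
  unfold pvCells
  rw [← pvFoldl_flatMap]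
  apply PySem.List.foldl_congr_mem
  intro m i hi
  rw [List.foldl_map, ← PySem.List.foldl_if_eq_foldl_filter]
  apply PySem.List.foldl_congr_mem
  intro m' j hj
  rw [PySem.List.mem_pyRange_one] at hi hj
  by_cases he : (pvAt graph i j == 0) = true
  · have hz : pvAt graph i j = 0 := by simpa using he
    rw [pvS_eq_pvCnt graph fr n i j hi.1 hi.2 hj.1 hj.2 hz]
    simp only [he, true_and, if_true]
    split_ifs <;> omega
  · simp [he]

theorem pvFilterMap_flatMap {A B C : Type} (l : List A) (g : A → List B) (p : B → Bool)
    (h : B → C) :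
    ((l.flatMap g).filter p).map h = l.flatMap (fun x => ((g x).filter p).map h) := by
  induction l with
  | nil => rfl
  | cons a t ih => simp [List.flatMap_cons, List.filter_append, ih]

theorem pvFlatMap_congr {A B : Type} (l : List A) (f g : A → List B)
    (h : ∀ x ∈ l, f x = g x) : l.flatMap f = l.flatMap g := by
  induction l with
  | nil => rfl
  | cons a t ih =>
    simp only [List.flatMap_cons]
    rw [h a (by simp), ih (fun x hx => h x (by simp [hx]))]

-- B's third pass equals "the cells of pvCells whose count is M", for any threshold M
theorem pvOut_eq (graph : List (List Int)) (fr : List Int) (n M : Int) :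
    (PySem.List.pyRange 0 n 1).flatMap (fun i =>
      ((PySem.List.pyRange 0 n 1).filter
          (fun j => pvAt graph i j == 0 && pvS graph fr n (i, j) == M)).map (fun j => (i, j)))
    = ((pvCells graph fr n).filter (fun x => x.2 == M)).map (·.1) := by
  unfold pvCells
  rw [pvFilterMap_flatMap]
  apply pvFlatMap_congr
  intro i hi
  rw [PySem.List.mem_pyRange_one] at hi
  rw [List.filter_map, List.map_map, List.filter_filter]
  have hf : ((fun x : (Int × Int) × Int => x.1) ∘ (fun j : Int => ((i, j), pvCnt graph fr n i j)))
      = (fun j : Int => (i, j)) := rfl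
  rw [hf]
  congr 1
  apply List.filter_congr
  intro j hj
  rw [PySem.List.mem_pyRange_one] at hj
  by_cases he : (pvAt graph i j == 0) = true
  · have hz : pvAt graph i j = 0 := by simpa using he
    rw [pvS_eq_pvCnt graph fr n i j hi.1 hi.2 hj.1 hj.2 hz]
    simp [he, Function.comp]
  · simp [he]

-- B equals "the cells of pvCells at its running max"
theorem pvB_eq (graph : List (List Int)) (number : List Int) :
    check_friend_alt graph number =
      ((pvCells graph number.tail (PySem.List.len graph)).filter
        (fun x => x.2 == (pvCells graph number.tail (PySem.List.len graph)).foldl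
            (fun a x => max a x.2) 0)).map (·.1) := by
  simp only [check_friend_alt, PySem.List.slice_from_one, PySem.Set.contains_eq_listContains,
    pvS_fold, pvM_eq]
  exact pvOut_eq graph number.tail (PySem.List.len graph) _

-- ===== VERDICT (by name: the statement is the Claim_ definition above) =====
theorem check_friend_spec : Claim_equal_check_friend := by
  intro graph number _ _
  unfold Spec_check_friend
  rw [pvA_eq, pvB_eq, pvRun_eq]
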